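-- pv_equiv track=rewrite | github.com/DaredevilSlim/Python | Checkio/List but not the least/words_order.py | words_order
-- ===== SOURCE A (Python) =====
-- def words_order(text: str, words: list) -> bool:
--     text = list(map(str, text.split()))
--     if len(words) != len(set(words)):
--         return False
--     for i in words:
--         if i in text:
--             text = text[text.index(i):]
--         else:
--             return False
--     return True
-- ===== SOURCE B (Python) =====
-- def words_order(text: str, words: list) -> bool:
--     if len(words) != len(set(words)):
--         return False
--     k = 0
--     for tok in text.split():
--         if k < len(words) and tok == words[k]:
--             k += 1
--     return k == len(words)
-- ===== Notes on version B (the rewrite author's own statement) =====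
-- stated objective: alternative
-- what changed: B makes a single pass over the tokens advancing a pointer into the (duplicate-checked) word list, instead of A's per-word membership test, list.index scan and slice of the remaining token list; same measured cost on the tested inputs.
import Mathlib
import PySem

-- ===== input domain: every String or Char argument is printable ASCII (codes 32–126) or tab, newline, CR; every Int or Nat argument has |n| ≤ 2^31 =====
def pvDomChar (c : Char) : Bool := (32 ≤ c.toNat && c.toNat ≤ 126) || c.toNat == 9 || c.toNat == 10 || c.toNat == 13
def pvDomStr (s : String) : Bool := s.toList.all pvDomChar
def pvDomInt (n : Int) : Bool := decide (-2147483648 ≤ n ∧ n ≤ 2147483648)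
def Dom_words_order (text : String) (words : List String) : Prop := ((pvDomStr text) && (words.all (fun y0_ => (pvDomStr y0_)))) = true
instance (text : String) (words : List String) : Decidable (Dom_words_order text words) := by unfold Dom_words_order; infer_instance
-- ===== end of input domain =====

-- B replaces A's per-word membership scan + slice of the remaining token list by a single
-- pass over the tokens advancing a pointer into the words (objective: alternative algorithm).

-- ===== PORT A =====
-- the 'for i in words' loop: state is the remaining (sliced) token list
def wordsLoop : List String → List String → Bool
  | [], _ => true
  | w :: ws, ts =>
      if ts.contains w then
        match PySem.List.index? ts w with
        | some i => wordsLoop ws (PySem.List.slice ts (some (i : Int)) none)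
        | none => false
      else false

def words_order (text : String) (words : List String) : Bool :=
  let ts := PySem.Str.split₀ text
  if words.length ≠ (PySem.Set.ofList words).length then false
  else wordsLoop words ts

-- ===== PORT B =====
-- the 'for tok in text.split()' loop of Source B: state is the pointer k into words
def altLoop (ws : List String) : List String → Nat → Nat
  | [], k => k
  | t :: ts, k => altLoop ws ts (if k < ws.length ∧ ws[k]? = some t then k + 1 else k)

def words_order_alt (text : String) (words : List String) : Bool :=
  if words.length ≠ (PySem.Set.ofList words).length then false
  else altLoop words (PySem.Str.split₀ text) 0 == words.length

-- ===== PRECONDITION & SPEC =====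
def Spec_words_order (text : String) (words : List String) (out : Bool) : Prop := out = words_order_alt text words
instance (text : String) (words : List String) (out : Bool) : Decidable (Spec_words_order text words out) := by unfold Spec_words_order; infer_instance

-- ===== CLAIM (what is proved, stated in full; the proofs are below) =====
def Claim_equal_words_order : Prop := ∀ (text : String) (words : List String), Dom_words_order text words → Spec_words_order text words (words_order text words)

-- ===== LEMMAS AND PROOFS =====

-- Counting distinct elements: the length of each Set.add step
theorem add_length_of_contains (s : List String) (x : String) (h : PySem.Set.contains s x = true) :
    PySem.Set.add s x = s := by unfold PySem.Set.add; rw [if_pos h]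

theorem add_length_of_not_contains (s : List String) (x : String) (h : ¬ PySem.Set.contains s x = true) :
    PySem.Set.add s x = s ++ [x] := by unfold PySem.Set.add; rw [if_neg h]

theorem foldl_add_length_le (xs s : List String) :
    (xs.foldl PySem.Set.add s).length ≤ s.length + xs.length := by
  induction xs generalizing s with
  | nil => simp
  | cons x xs ih =>
    simp only [List.foldl_cons, List.length_cons]
    refine le_trans (ih _) ?_
    by_cases h : PySem.Set.contains s x
    · rw [add_length_of_contains s x h]; omega
    · rw [add_length_of_not_contains s x h]; simp; omega

theorem foldl_add_length_eq_iff (xs s : List String) :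
    (xs.foldl PySem.Set.add s).length = s.length + xs.length ↔
      xs.Nodup ∧ ∀ x ∈ xs, x ∉ s := by
  induction xs generalizing s with
  | nil => simp
  | cons x xs ih =>
    simp only [List.foldl_cons, List.length_cons]
    by_cases h : PySem.Set.contains s x
    · have hxs : x ∈ s := by simpa [PySem.Set.contains] using h
      rw [add_length_of_contains s x h]
      have hle := foldl_add_length_le xs s
      constructor
      · intro hlen; omega
      · rintro ⟨-, hall⟩
        exact absurd hxs (hall x (by simp))
    · have hxs : x ∉ s := by simpa [PySem.Set.contains] using h
      rw [add_length_of_not_contains s x h]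
      rw [show s.length + (xs.length + 1) = (s ++ [x]).length + xs.length by
        simp; omega]
      rw [ih (s ++ [x])]
      constructor
      · rintro ⟨hnd, hall⟩
        refine ⟨List.nodup_cons.mpr ⟨fun hx => ?_, hnd⟩, ?_⟩
        · have := hall x hx; simp at this
        · intro y hy
          rcases List.mem_cons.mp hy with rfl | hy'
          · exact hxs
          · have := hall y hy'; simp at this; exact this.1
      · rintro ⟨hnd, hall⟩
        refine ⟨(List.nodup_cons.mp hnd).2, fun y hy hmem => ?_⟩
        rcases List.mem_append.mp hmem with h1 | h2
        · exact hall y (List.mem_cons_of_mem _ hy) h1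
        · have hyx : y = x := by simpa using h2
          exact (List.nodup_cons.mp hnd).1 (hyx ▸ hy)

theorem ofList_length_eq_iff (xs : List String) :
    (xs.length = (PySem.Set.ofList xs).length) ↔ xs.Nodup := by
  rw [PySem.Set.ofList_eq_foldl]
  constructor
  · intro h
    exact ((foldl_add_length_eq_iff xs []).mp (by simpa [PySem.Set.empty] using h.symm)).1
  · intro h
    have := (foldl_add_length_eq_iff xs []).mpr ⟨h, by simp⟩
    simpa [PySem.Set.empty] using this.symm

-- B's pointer loop decides "remaining words are a subsequence of the tokens"
theorem altLoop_iff (ws : List String) :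
    ∀ (ts : List String) (k : Nat), k ≤ ws.length →
      (altLoop ws ts k = ws.length ↔ (ws.drop k).Sublist ts) := by
  intro ts
  induction ts with
  | nil =>
    intro k hk
    simp only [altLoop, List.sublist_nil, List.drop_eq_nil_iff]
    omega
  | cons t ts ih =>
    intro k hk
    simp only [altLoop]
    by_cases hc : k < ws.length ∧ ws[k]? = some t
    · rw [if_pos hc, ih (k + 1) hc.1]
      have hdrop : ws.drop k = t :: ws.drop (k + 1) := by
        rw [List.drop_eq_getElem_cons hc.1]
        have := hc.2
        simp [List.getElem?_eq_getElem hc.1] at this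
        simp [this]
      rw [hdrop, List.cons_sublist_cons]
    · rw [if_neg hc, ih k hk]
      constructor
      · exact fun h => h.cons t
      · intro h
        rcases List.sublist_cons_iff.mp h with h' | ⟨r, hr, hrs⟩
        · exact h'
        · exfalso
          rcases Nat.lt_or_ge k ws.length with hlt | hge
          · have : ws[k]? = some t := by
              have := congrArg List.head? hr
              simpa [List.head?_drop, List.getElem?_eq_getElem hlt] using this
            exact hc ⟨hlt, this⟩
          · have h0 : ws.drop k = [] := List.drop_eq_nil_iff.mpr hge
            rw [h0] at hr
            simp at hr

-- A's loop keeps the matched word at the head of the sliced text; a head unequal to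
-- every remaining word is transparent to the next step
theorem wordsLoop_cons_head_ne (ws : List String) (w : String) (ts : List String)
    (h : ∀ x ∈ ws, x ≠ w) : wordsLoop ws (w :: ts) = wordsLoop ws ts := by
  cases ws with
  | nil => rfl
  | cons w' ws' =>
    have hne : w' ≠ w := h w' (by simp)
    simp only [wordsLoop, List.contains_cons]
    rw [show (w' == w) = false by simpa using hne]
    simp only [Bool.false_or]
    rw [PySem.List.index?_cons_of_ne ts hne.symm]
    by_cases hc : ts.contains w'
    · rcases Option.isSome_iff_exists.mp
        ((PySem.List.index?_isSome_iff ts w').mpr (by simpa using hc)) with ⟨i, hi⟩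
      have hs : PySem.List.slice (w :: ts) (some (((i + 1 : Nat)) : Int)) none
          = PySem.List.slice ts (some ((i : Nat) : Int)) none := by
        rw [PySem.List.slice_from_natCast, PySem.List.slice_from_natCast]
        simp [List.drop_succ_cons]
      simp only [if_pos hc, hi, Option.map_some, hs]
    · simp only [if_neg hc]

theorem cons_sublist_middle_iff (pre : List String) (w : String) (ws suf : List String)
    (hw : w ∉ pre) : (w :: ws).Sublist (pre ++ w :: suf) ↔ ws.Sublist suf := by
  constructor
  · intro h
    induction pre with
    | nil => exact List.cons_sublist_cons.mp h
    | cons p pre ih =>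
      rcases List.sublist_cons_iff.mp h with h' | ⟨r, hr, hrs⟩
      · exact ih (fun hx => hw (by simp [hx])) h'
      · exact absurd ((List.cons.injEq .. ▸ hr).1).symm (fun he => hw (by simp [he]))
  · intro h
    exact (List.cons_sublist_cons.mpr h).trans (List.sublist_append_right _ _)

-- A's loop (on duplicate-free words) also decides the subsequence property
theorem wordsLoop_iff (ws : List String) :
    ∀ ts : List String, ws.Nodup → (wordsLoop ws ts = true ↔ ws.Sublist ts) := by
  induction ws with
  | nil => intro ts _; simp [wordsLoop, List.nil_sublist]
  | cons w ws ih =>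
    intro ts hnd
    by_cases hc : ts.contains w
    · rcases Option.isSome_iff_exists.mp
        ((PySem.List.index?_isSome_iff ts w).mpr (by simpa using hc)) with ⟨i, hi⟩
      rcases (PySem.List.index?_eq_some_iff ts w i).mp hi with ⟨pre, suf, hts, hlen, hwpre⟩
      have hslice : PySem.List.slice ts (some ((i : Nat) : Int)) none = w :: suf := by
        rw [PySem.List.slice_from_natCast, hts, ← hlen, List.drop_left]
      have hne : ∀ x ∈ ws, x ≠ w := fun x hx he =>
        (List.nodup_cons.mp hnd).1 (he ▸ hx)
      have hred : wordsLoop (w :: ws) ts = wordsLoop ws suf := by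
        simp only [wordsLoop, if_pos hc, hi, hslice]
        exact wordsLoop_cons_head_ne ws w suf hne
      rw [hred, ih suf (List.nodup_cons.mp hnd).2, hts]
      exact (cons_sublist_middle_iff pre w ws suf hwpre).symm
    · have hred : wordsLoop (w :: ws) ts = false := by
        simp only [wordsLoop, if_neg hc]
      rw [hred]
      simp only [Bool.false_eq_true, false_iff]
      intro h
      exact (by simpa using hc : w ∉ ts) (h.subset (by simp))

-- ===== VERDICT (by name: the statement is the Claim_ definition above) =====
theorem words_order_spec : Claim_equal_words_order := by
  intro text words _
  unfold Spec_words_order words_order words_order_alt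
  by_cases hdup : words.length ≠ (PySem.Set.ofList words).length
  · rw [if_pos hdup, if_pos hdup]
  · rw [if_neg hdup, if_neg hdup]
    have hnd : words.Nodup := (ofList_length_eq_iff words).mp (by omega)
    set ts := PySem.Str.split₀ text
    rw [Bool.eq_iff_iff, beq_iff_eq]
    rw [wordsLoop_iff words ts hnd]
    rw [altLoop_iff words ts 0 (Nat.zero_le _)]
    simp
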